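-- pv_equiv track=rewrite | github.com/adityaManjare/BaseConverter | module_2.py | _add_no_overflow
-- ===== SOURCE A (Python) =====
-- def _add_no_overflow(a: str, b: str, w: int) -> str:
--     res = ['0'] * w
--     carry = 0
--     for i in range(w - 1, -1, -1):
--         s = int(a[i]) + int(b[i]) + carry
--         res[i] = str(s & 1)
--         carry = s >> 1
--     return ''.join(res)
-- ===== SOURCE B (Python) =====
-- def _add_no_overflow(a: str, b: str, w: int) -> str:
--     if w <= 0:
--         return ''
--     total = sum((int(a[i]) + int(b[i])) << (w - 1 - i) for i in range(w))
--     return format(total & ((1 << w) - 1), '0{}b'.format(w))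
-- ===== Notes on version B (the rewrite author's own statement) =====
-- stated objective: simpler
-- what changed: A simulates addition bit by bit, mutating a result list and threading a carry from the right; B computes the single weighted integer sum of the digit columns once, masks off the overflow with (1 << w) - 1, and renders it with format(total, '0wb') - no carry variable, no list mutation.
import Mathlib
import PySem

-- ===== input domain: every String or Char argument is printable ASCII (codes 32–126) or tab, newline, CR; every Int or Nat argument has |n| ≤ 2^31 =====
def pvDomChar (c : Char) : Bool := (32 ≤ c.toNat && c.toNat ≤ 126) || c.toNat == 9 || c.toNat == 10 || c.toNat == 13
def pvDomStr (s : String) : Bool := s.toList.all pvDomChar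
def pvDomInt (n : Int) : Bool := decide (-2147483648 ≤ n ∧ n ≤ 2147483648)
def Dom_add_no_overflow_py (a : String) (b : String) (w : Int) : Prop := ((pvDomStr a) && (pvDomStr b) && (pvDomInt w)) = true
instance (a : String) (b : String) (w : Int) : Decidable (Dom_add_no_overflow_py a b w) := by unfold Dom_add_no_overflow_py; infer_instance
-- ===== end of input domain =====

-- B replaces A's bit-by-bit carry loop by one numeric accumulation, a mask and a binary format (objective: simpler); equivalence is proved on Pre_, the inputs where A returns.

-- ===== PORT A =====
-- int(x[i]): none (IndexError / ValueError) is excluded by Pre_; the default 0 is unreachable there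
def pvIntAt (x : String) (i : Int) : Int :=
  ((PySem.Str.pyGet? x i).bind (fun c => PySem.Int.ofStr? (String.ofList [c]))).getD 0

-- one iteration of A's loop body: s = int(a[i]) + int(b[i]) + carry; res[i] = str(s & 1); carry = s >> 1
-- (i ≥ 0 inside range(w-1, -1, -1), so res[i] is List.set at i.toNat)
def pvStep (a b : String) (st : List String × Int) (i : Int) : List String × Int :=
  let s : Int := pvIntAt a i + pvIntAt b i + st.2
  (st.1.set i.toNat (PySem.Int.toStr (PySem.Int.band s 1)), s >>> (1 : Nat))

def add_no_overflow_py (a : String) (b : String) (w : Int) : String :=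
  let res : List String := List.replicate w.toNat "0"        -- ['0'] * w
  let fin := (PySem.List.pyRange (w - 1) (-1) (-1)).foldl (pvStep a b) (res, 0)
  PySem.Str.join "" fin.1                                     -- ''.join(res)

-- ===== PORT B =====
-- bin digits of m, most significant first (the digits format(m, '…b') prints for m ≥ 0)
def pvBinChars (m : Nat) : List Char :=
  if m < 2 then [Nat.digitChar m]
  else pvBinChars (m / 2) ++ [Nat.digitChar (m % 2)]
decreasing_by exact Nat.div_lt_self (by omega) (by omega)

-- format(v, '0{width}b') for v ≥ 0 (the only case at the call site: v is a masked non-negative sum)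
def pvFormatBin (v : Int) (width : Nat) : String :=
  let cs := pvBinChars v.toNat
  String.ofList (List.replicate (width - cs.length) '0' ++ cs)

-- one term of B's sum: (int(a[i]) + int(b[i])) << (w - 1 - i)  (shift amount ≥ 0 since i < w)
def pvAcc (a b : String) (w : Int) (acc : Int) (i : Int) : Int :=
  acc + ((pvIntAt a i + pvIntAt b i) <<< (w - 1 - i).toNat)

def add_no_overflow_py_alt (a : String) (b : String) (w : Int) : String :=
  if w ≤ 0 then "" else
    let total : Int := (PySem.List.pyRange 0 w 1).foldl (pvAcc a b w) 0
    pvFormatBin (PySem.Int.band total ((1 <<< w.toNat) - 1)) w.toNat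

-- ===== PRECONDITION & SPEC =====
def pvDigits : List Char := ['0', '1', '2', '3', '4', '5', '6', '7', '8', '9']

-- exactly the inputs on which A returns: positions 0..w-1 exist in both strings and hold
-- decimal digit characters (otherwise A raises IndexError / ValueError; so does B)
def Pre_add_no_overflow_py (a : String) (b : String) (w : Int) : Prop :=
  w ≤ (a.toList.length : Int) ∧ w ≤ (b.toList.length : Int) ∧
  ∀ i : Nat, i < min w.toNat a.toList.length →
    a.toList[i]?.getD ' ' ∈ pvDigits ∧ b.toList[i]?.getD ' ' ∈ pvDigits

instance (a : String) (b : String) (w : Int) : Decidable (Pre_add_no_overflow_py a b w) := by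
  unfold Pre_add_no_overflow_py; infer_instance

def pvWitness_add_no_overflow_py : String × String × Int := ("10", "11", 2)

def Spec_add_no_overflow_py (a : String) (b : String) (w : Int) (out : String) : Prop := out = add_no_overflow_py_alt a b w
instance (a : String) (b : String) (w : Int) (out : String) : Decidable (Spec_add_no_overflow_py a b w out) := by unfold Spec_add_no_overflow_py; infer_instance

-- ===== CLAIM (what is proved, stated in full; the proofs are below) =====
def Claim_equal_add_no_overflow_py : Prop := ∀ (a : String) (b : String) (w : Int), Dom_add_no_overflow_py a b w → Pre_add_no_overflow_py a b w → Spec_add_no_overflow_py a b w (add_no_overflow_py a b w)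

-- ===== LEMMAS AND PROOFS =====

-- digit value of position k (under Pre_ the char is a decimal digit)
def pvDigVal (x : String) (k : Nat) : Nat := (x.toList[k]?.getD '0').toNat - 48

-- column sum at position k
def pvCol (a b : String) (k : Nat) : Nat := pvDigVal a k + pvDigVal b k

-- the n low bits of m, most significant first
def pvBitsBE : Nat → Nat → List Char
  | 0, _ => []
  | n+1, m => Nat.digitChar (m / 2^n % 2) :: pvBitsBE n m

-- ripple-carry addition over a list of column sums (head = most significant)
def pvCarryRun : List Nat → List Char × Nat
  | [] => ([], 0)
  | t :: ts =>
    let p := pvCarryRun ts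
    (Nat.digitChar ((t + p.2) % 2) :: p.1, (t + p.2) / 2)

-- value of a column list (head weighted highest)
def pvVal : List Nat → Nat
  | [] => 0
  | t :: ts => t * 2 ^ ts.length + pvVal ts

-- columns j..n-1
def pvCols (a b : String) (n j : Nat) : List Nat := (List.range' j (n - j)).map (pvCol a b)

lemma pvBitsBE_length (n m : Nat) : (pvBitsBE n m).length = n := by
  induction n generalizing m with
  | zero => rfl
  | succ n ih => simp [pvBitsBE, ih]

lemma pvBitsBE_shift (n : Nat) : ∀ k v, pvBitsBE n (k * 2 ^ n + v) = pvBitsBE n v := by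
  induction n with
  | zero => intro k v; rfl
  | succ n ih =>
    intro k v
    have h2 : (0:Nat) < 2 ^ n := Nat.pow_pos (by omega : (0:Nat) < 2)
    have e1 : k * 2 ^ (n+1) + v = (2 * k) * 2 ^ n + v := by ring
    have hdiv : ((2 * k) * 2 ^ n + v) / 2 ^ n = v / 2 ^ n + 2 * k := by
      rw [Nat.add_comm, Nat.add_mul_div_right _ _ h2]
    have hmod : (v / 2 ^ n + 2 * k) % 2 = v / 2 ^ n % 2 := by omega
    simp only [pvBitsBE, e1, ih (2 * k) v, hdiv, hmod]

lemma pvBitsBE_snoc (n : Nat) : ∀ m, pvBitsBE (n+1) m = pvBitsBE n (m / 2) ++ [Nat.digitChar (m % 2)] := by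
  induction n with
  | zero => intro m; simp [pvBitsBE]
  | succ n ih =>
    intro m
    have hd : m / 2 / 2 ^ n = m / 2 ^ (n+1) := by
      rw [Nat.div_div_eq_div_mul]; congr 1; rw [pow_succ]; ring
    calc pvBitsBE (n+2) m
        = Nat.digitChar (m / 2 ^ (n+1) % 2) :: pvBitsBE (n+1) m := rfl
      _ = Nat.digitChar (m / 2 ^ (n+1) % 2) :: (pvBitsBE n (m / 2) ++ [Nat.digitChar (m % 2)]) := by rw [ih m]
      _ = (Nat.digitChar (m / 2 / 2 ^ n % 2) :: pvBitsBE n (m / 2)) ++ [Nat.digitChar (m % 2)] := by rw [hd, List.cons_append]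
      _ = pvBitsBE (n+1) (m / 2) ++ [Nat.digitChar (m % 2)] := rfl

lemma pvCarryRun_spec : ∀ ts : List Nat,
    pvCarryRun ts = (pvBitsBE ts.length (pvVal ts), pvVal ts / 2 ^ ts.length) := by
  intro ts
  induction ts with
  | nil => rfl
  | cons t ts ih =>
    have h2 : (0:Nat) < 2 ^ ts.length := Nat.pow_pos (by omega : (0:Nat) < 2)
    have hdiv : pvVal (t :: ts) / 2 ^ ts.length = t + pvVal ts / 2 ^ ts.length := by
      show (t * 2 ^ ts.length + pvVal ts) / 2 ^ ts.length = _
      rw [Nat.add_comm, Nat.add_mul_div_right _ _ h2]; omega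
    simp only [pvCarryRun, ih]
    refine Prod.ext ?_ ?_
    · show Nat.digitChar ((t + pvVal ts / 2 ^ ts.length) % 2) :: pvBitsBE ts.length (pvVal ts)
         = pvBitsBE (ts.length + 1) (pvVal (t :: ts))
      have htl : pvBitsBE ts.length (pvVal (t :: ts)) = pvBitsBE ts.length (pvVal ts) := by
        show pvBitsBE ts.length (t * 2 ^ ts.length + pvVal ts) = _
        exact pvBitsBE_shift ts.length t (pvVal ts)
      simp only [pvBitsBE, htl, ← hdiv]
    · show (t + pvVal ts / 2 ^ ts.length) / 2 = pvVal (t :: ts) / 2 ^ (ts.length + 1)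
      rw [← hdiv, Nat.div_div_eq_div_mul, pow_succ]

lemma pvVal_snoc (l : List Nat) (x : Nat) : pvVal (l ++ [x]) = 2 * pvVal l + x := by
  induction l with
  | nil => simp [pvVal]
  | cons t l ih =>
    simp only [List.cons_append, pvVal, ih, List.length_append, List.length_cons,
      List.length_nil]
    ring

lemma pvIntAt_eq (x : String) (k : Nat) (h1 : k < x.toList.length)
    (h2 : x.toList[k]?.getD ' ' ∈ pvDigits) :
    pvIntAt x (k : Int) = (pvDigVal x k : Int) := by
  have hg : x.toList[k]? = some x.toList[k] := List.getElem?_eq_getElem h1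
  have hsame : x.toList[k]?.getD ' ' = x.toList[k] := by rw [hg]; rfl
  have hv : pvDigVal x k = (x.toList[k]).toNat - 48 := by
    unfold pvDigVal; rw [hg]; rfl
  rw [hsame] at h2
  unfold pvIntAt
  rw [show PySem.Str.pyGet? x (k : Int) = x.toList[k]? by
    simp [PySem.Str.pyGet?_eq, PySem.List.pyGet?_natCast]]
  rw [hg, hv]
  simp only [pvDigits, List.mem_cons, List.not_mem_nil, or_false] at h2
  rcases h2 with h | h | h | h | h | h | h | h | h | h <;> rw [h] <;> decide

lemma pvCols_cons (a b : String) (n j : Nat) (h : j < n) :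
    pvCols a b n j = pvCol a b j :: pvCols a b n (j+1) := by
  unfold pvCols
  rw [show n - j = (n - (j+1)) + 1 by omega, List.range'_succ]
  rfl

lemma pvSet_mid (j : Nat) (x y : String) (l : List String) :
    (List.replicate (j+1) x ++ l).set j y = List.replicate j x ++ y :: l := by
  induction j with
  | zero => rfl
  | succ j ih => simp [List.replicate_succ]; exact ih

lemma pvShiftR (m : Nat) : ((m : Int)) >>> (1 : Nat) = ((m / 2 : Nat) : Int) := by
  rw [show ((m : Int)) >>> (1 : Nat) = ((m >>> 1 : Nat) : Int) from rfl, Nat.shiftRight_one]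

lemma pvBand1 (m : Nat) : PySem.Int.band (m : Int) 1 = ((m % 2 : Nat) : Int) := by
  rw [show (1 : Int) = ((1 : Nat) : Int) by simp, PySem.Int.band_natCast,
    Nat.and_one_is_mod]

-- A's loop, run on indices j..n-1 (foldr form), produces the carry-run of columns j..n-1
lemma pvA_loop (a b : String) (n : Nat)
    (hpre : ∀ i : Nat, i < n → i < a.toList.length ∧ i < b.toList.length ∧
      a.toList[i]?.getD ' ' ∈ pvDigits ∧ b.toList[i]?.getD ' ' ∈ pvDigits) :
    ∀ k j : Nat, j + k = n →
    (PySem.List.pyRange (j : Int) (n : Int) 1).foldr (fun i st => pvStep a b st i)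
        (List.replicate n "0", (0 : Int))
      = (List.replicate j "0" ++ (pvCarryRun (pvCols a b n j)).1.map (fun c => String.ofList [c]),
         ((pvCarryRun (pvCols a b n j)).2 : Int)) := by
  intro k
  induction k with
  | zero =>
    intro j hj
    have hj' : j = n := by omega
    subst hj'
    rw [PySem.List.pyRange_one_eq_nil (by omega)]
    simp [pvCols, pvCarryRun]
  | succ k ih =>
    intro j hj
    have hjn : j < n := by omega
    rw [PySem.List.pyRange_one_cons (by exact_mod_cast hjn),
      show ((j : Int) + 1) = ((j + 1 : Nat) : Int) by push_cast; ring]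
    rw [List.foldr_cons, ih (j+1) (by omega)]
    obtain ⟨ha1, hb1, ha2, hb2⟩ := hpre j hjn
    rw [pvCols_cons a b n j hjn]
    simp only [pvStep, pvIntAt_eq a j ha1 ha2, pvIntAt_eq b j hb1 hb2]
    set c := (pvCarryRun (pvCols a b n (j+1))).2 with hc
    set cs := (pvCarryRun (pvCols a b n (j+1))).1 with hcs
    have hm : (pvDigVal a j : Int) + (pvDigVal b j : Int) + (c : Int)
        = ((pvCol a b j + c : Nat) : Int) := by push_cast [pvCol]; ring
    rw [hm, pvBand1, pvShiftR]
    have hset : (List.replicate (j+1) "0" ++ cs.map (fun c => String.ofList [c])).set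
        ((( j : Int)).toNat) (PySem.Int.toStr (((pvCol a b j + c) % 2 : Nat) : Int))
        = List.replicate j "0" ++ (PySem.Int.toStr (((pvCol a b j + c) % 2 : Nat) : Int))
            :: cs.map (fun c => String.ofList [c]) := by
      rw [Int.toNat_natCast]; exact pvSet_mid j _ _ _
    rw [hset]
    have hchar : PySem.Int.toStr (((pvCol a b j + c) % 2 : Nat) : Int)
        = String.ofList [Nat.digitChar ((pvCol a b j + c) % 2)] := by
      rcases Nat.mod_two_eq_zero_or_one (pvCol a b j + c) with h | h <;> rw [h] <;> decide
    rw [hchar]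
    show _ = (List.replicate j "0" ++ (Nat.digitChar ((pvCol a b j + c) % 2) :: cs).map
        (fun c => String.ofList [c]), (((pvCol a b j + c) / 2 : Nat) : Int))
    simp

lemma pvJoin_singletons (cs : List Char) :
    PySem.Str.join "" (cs.map (fun c => String.ofList [c])) = String.ofList cs := by
  simp [PySem.Str.join, Function.comp_def, PySem.Chars.join_nil_singletons]

-- A's result for w > 0: the n low bits of the total, most significant first
lemma pvA_top (a b : String) (w : Int) (hw : 0 < w)
    (hpre : ∀ i : Nat, i < w.toNat → i < a.toList.length ∧ i < b.toList.length ∧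
      a.toList[i]?.getD ' ' ∈ pvDigits ∧ b.toList[i]?.getD ' ' ∈ pvDigits) :
    add_no_overflow_py a b w
      = String.ofList (pvBitsBE w.toNat (pvVal (pvCols a b w.toNat 0))) := by
  set n := w.toNat with hn
  have hwn : (n : Int) = w := Int.toNat_of_nonneg (by omega)
  unfold add_no_overflow_py
  show PySem.Str.join "" (((PySem.List.pyRange (w - 1) (-1) (-1)).foldl (pvStep a b)
      (List.replicate w.toNat "0", (0 : Int))).1) = _
  rw [show PySem.List.pyRange (w - 1) (-1) (-1)
      = (PySem.List.pyRange 0 w 1).reverse by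
    rw [PySem.List.pyRange_neg_one_eq_reverse]; norm_num]
  rw [List.foldl_reverse]
  rw [← hwn]
  simp only [Int.toNat_natCast]
  have hl := pvA_loop a b n hpre n 0 (by omega)
  simp only [Nat.cast_zero, List.replicate_zero, List.nil_append] at hl
  rw [hl, pvCarryRun_spec]
  have hlen : (pvCols a b n 0).length = n := by simp [pvCols]
  rw [hlen, pvJoin_singletons]

-- B's accumulation: partial sums carry the weight 2^(n-k)
lemma pvB_sum (a b : String) (w : Int) (hw : 0 < w)
    (hpre : ∀ i : Nat, i < w.toNat → i < a.toList.length ∧ i < b.toList.length ∧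
      a.toList[i]?.getD ' ' ∈ pvDigits ∧ b.toList[i]?.getD ' ' ∈ pvDigits) :
    ∀ k : Nat, k ≤ w.toNat →
    (PySem.List.pyRange 0 (k : Int) 1).foldl (pvAcc a b w) 0
      = ((pvVal ((List.range k).map (pvCol a b)) * 2 ^ (w.toNat - k) : Nat) : Int) := by
  set n := w.toNat with hn
  intro k
  induction k with
  | zero =>
    intro _
    rw [PySem.List.pyRange_one_eq_nil (by omega)]
    simp [pvVal]
  | succ k ih =>
    intro hk
    have hkn : k < n := by omega
    rw [show ((k + 1 : Nat) : Int) = (k : Int) + 1 by push_cast; ring,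
      PySem.List.pyRange_one_succ_right (by omega), List.foldl_append,
      ih (by omega)]
    obtain ⟨ha1, hb1, ha2, hb2⟩ := hpre k hkn
    simp only [List.foldl_cons, List.foldl_nil, pvAcc,
      pvIntAt_eq a k ha1 ha2, pvIntAt_eq b k hb1 hb2]
    have hsh : (w - 1 - (k : Int)).toNat = n - 1 - k := by omega
    rw [hsh]
    have hcast : (pvDigVal a k : Int) + (pvDigVal b k : Int) = ((pvCol a b k : Nat) : Int) := by
      push_cast [pvCol]; ring
    rw [hcast,
      show ((pvCol a b k : Nat) : Int) <<< (n - 1 - k) = ((pvCol a b k <<< (n - 1 - k) : Nat) : Int) from rfl]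
    rw [List.range_succ, List.map_append, List.map_cons, List.map_nil, pvVal_snoc]
    push_cast [Nat.shiftLeft_eq]
    have he : (2:Int) ^ (n - k) = 2 ^ (n - 1 - k) * 2 := by
      rw [← pow_succ]; congr 1; omega
    have he2 : (2:Int) ^ (n - (k+1)) = 2 ^ (n - 1 - k) := by congr 1; omega
    rw [he, he2]
    ring

-- exact-width binary digits agree with pvBitsBE
lemma pvBinChars_exact (n : Nat) : ∀ m, 2 ^ n ≤ m → m < 2 ^ (n+1) →
    pvBinChars m = pvBitsBE (n+1) m := by
  induction n with
  | zero =>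
    intro m h1 h2
    have : m = 1 := by omega
    subst this
    rw [pvBinChars]
    norm_num [pvBitsBE]
  | succ n ih =>
    intro m h1 h2
    have hm2 : ¬ m < 2 := by
      have : (2:Nat) ≤ 2 ^ (n+1) := by
        calc (2:Nat) = 2 ^ 1 := rfl
        _ ≤ 2 ^ (n+1) := Nat.pow_le_pow_right (by omega) (by omega)
      omega
    rw [pvBinChars, if_neg hm2]
    have hd1 : 2 ^ n ≤ m / 2 := Nat.le_div_iff_mul_le (by omega) |>.2 (by
      rw [pow_succ] at h1; omega)
    have hd2 : m / 2 < 2 ^ (n+1) := Nat.div_lt_iff_lt_mul (by omega) |>.2 (by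
      rw [pow_succ] at h2; omega)
    rw [ih (m / 2) hd1 hd2, ← pvBitsBE_snoc]

lemma pvBinChars_len (n : Nat) : ∀ m, m < 2 ^ n → 1 ≤ n → (pvBinChars m).length ≤ n := by
  induction n with
  | zero => intro m _ h; omega
  | succ n ih =>
    intro m hm _
    by_cases h2 : m < 2
    · rw [pvBinChars, if_pos h2]; simp
    · rw [pvBinChars, if_neg h2]
      have hn1 : 1 ≤ n := by
        by_contra h
        have : n = 0 := by omega
        subst this; simp at hm; omega
      have : m / 2 < 2 ^ n := Nat.div_lt_iff_lt_mul (by omega) |>.2 (by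
        rw [pow_succ] at hm; omega)
      have := ih (m / 2) this hn1
      simp only [List.length_append, List.length_cons, List.length_nil]
      omega

lemma pvPad (n : Nat) : ∀ m, m < 2 ^ n → 1 ≤ n →
    List.replicate (n - (pvBinChars m).length) '0' ++ pvBinChars m = pvBitsBE n m := by
  induction n with
  | zero => intro m _ h; omega
  | succ n ih =>
    intro m hm _
    by_cases hlow : m < 2 ^ n
    · by_cases hn0 : n = 0
      · subst hn0
        have hm2 : m < 2 := by omega
        rw [pvBinChars, if_pos hm2]
        simp [pvBitsBE, Nat.mod_eq_of_lt hm2]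
      · have hn1 : 1 ≤ n := by omega
        have hlen := pvBinChars_len n m hlow hn1
        have hdig : m / 2 ^ n = 0 := Nat.div_eq_of_lt hlow
        rw [show n + 1 - (pvBinChars m).length = (n - (pvBinChars m).length) + 1 by omega]
        rw [List.replicate_succ, List.cons_append, ih m hlow hn1]
        simp [pvBitsBE, hdig]
        rfl
    · have h1 : 2 ^ n ≤ m := by omega
      rw [pvBinChars_exact n m h1 hm]
      rw [pvBitsBE_length]
      simp

-- B's result for w > 0
lemma pvB_top (a b : String) (w : Int) (hw : 0 < w)
    (hpre : ∀ i : Nat, i < w.toNat → i < a.toList.length ∧ i < b.toList.length ∧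
      a.toList[i]?.getD ' ' ∈ pvDigits ∧ b.toList[i]?.getD ' ' ∈ pvDigits) :
    add_no_overflow_py_alt a b w
      = String.ofList (pvBitsBE w.toNat (pvVal (pvCols a b w.toNat 0))) := by
  set n := w.toNat with hn
  have hn1 : 1 ≤ n := by omega
  have hwn : (n : Int) = w := Int.toNat_of_nonneg (by omega)
  set T := pvVal (pvCols a b n 0) with hT
  unfold add_no_overflow_py_alt
  rw [if_neg (by omega)]
  show pvFormatBin (PySem.Int.band ((PySem.List.pyRange 0 w 1).foldl (pvAcc a b w) 0)
      ((((1 <<< n : Nat)) : Int) - 1)) n = _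
  have hs := pvB_sum a b w hw hpre n (le_refl n)
  rw [hwn] at hs
  rw [hs, Nat.sub_self, pow_zero, Nat.mul_one]
  have hco : (List.range n).map (pvCol a b) = pvCols a b n 0 := by
    unfold pvCols; rw [Nat.sub_zero, List.range_eq_range']
  rw [hco, ← hT]
  have h2 : (1:Nat) ≤ 2 ^ n := Nat.one_le_two_pow
  have hmask : (((1 <<< n : Nat)) : Int) - 1 = ((2 ^ n - 1 : Nat) : Int) := by
    rw [show (1:Nat) <<< n = 2 ^ n by rw [Nat.shiftLeft_eq]; omega]
    push_cast [h2]
    ring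
  rw [hmask, PySem.Int.band_natCast, Nat.and_two_pow_sub_one_eq_mod]
  unfold pvFormatBin
  rw [Int.toNat_natCast]
  show String.ofList (List.replicate (n - (pvBinChars (T % 2 ^ n)).length) '0'
      ++ pvBinChars (T % 2 ^ n)) = _
  have hmod : T % 2 ^ n < 2 ^ n := Nat.mod_lt _ (Nat.pow_pos (by omega : (0:Nat) < 2))
  rw [show List.replicate (n - (pvBinChars (T % 2 ^ n)).length) '0' ++ pvBinChars (T % 2 ^ n)
      = pvBitsBE n (T % 2 ^ n) from pvPad n (T % 2 ^ n) hmod hn1]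
  congr 1
  have hTsplit : T = (T / 2 ^ n) * 2 ^ n + T % 2 ^ n := by
    conv_lhs => rw [← Nat.div_add_mod T (2 ^ n)]
    ring
  conv_rhs => rw [hTsplit]
  rw [pvBitsBE_shift]

-- ===== VERDICT (by name: the statement is the Claim_ definition above) =====
theorem add_no_overflow_py_spec : Claim_equal_add_no_overflow_py := by
  intro a b w _ hpre
  obtain ⟨hla, hlb, hdig⟩ := hpre
  have hpre : ∀ i : Nat, i < w.toNat → i < a.toList.length ∧ i < b.toList.length ∧
      a.toList[i]?.getD ' ' ∈ pvDigits ∧ b.toList[i]?.getD ' ' ∈ pvDigits := by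
    intro i hi
    have hia : i < a.toList.length := by omega
    have hib : i < b.toList.length := by omega
    have h3 := hdig i (by omega)
    exact ⟨hia, hib, h3.1, h3.2⟩
  unfold Spec_add_no_overflow_py
  by_cases hw : w ≤ 0
  · unfold add_no_overflow_py add_no_overflow_py_alt
    rw [if_pos hw]
    show PySem.Str.join "" (((PySem.List.pyRange (w - 1) (-1) (-1)).foldl (pvStep a b)
        (List.replicate w.toNat "0", (0 : Int))).1) = ""

    rw [PySem.List.pyRange_neg_one_eq_nil (by omega)]
    rw [show w.toNat = 0 by omega]
    simp [PySem.Str.join]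
  · rw [pvA_top a b w (by omega) hpre, pvB_top a b w (by omega) hpre]
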